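-- pv_equiv track=rewrite | github.com/lamu6354/1lab | 1lab/main.py | find_start_to_stop
-- ===== SOURCE A (Python) =====
-- stop_codons = ['TAG', 'TAA', 'TGA']
--
-- def find_start_to_stop(frame, stride, x, length):
--     found = False
--     for j in range(len(frame[stride:])):
--         x += frame[j + stride]
--         length += 1
--         if frame[j + stride:j + stride + 3] in stop_codons:
--             x += frame[j + stride + 1] + frame[j + stride + 2]
--             found = True
--             length += 2
--             break
--     return found, x
-- ===== SOURCE B (Python) =====
-- stop_codons = ['TAG', 'TAA', 'TGA']
--
-- def find_start_to_stop(frame, stride, x, length):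
--     hits = [p for p in (frame.find(c, stride) for c in stop_codons) if p != -1]
--     if hits:
--         p = min(hits)
--         return True, x + frame[stride:p + 3]
--     return False, x + frame[stride:]
-- ===== Notes on version B (the rewrite author's own statement) =====
-- stated objective: idiomatic
-- what changed: A scans every overlapping 3-char window in an accumulating per-character loop with break; B calls str.find once per stop codon, takes the minimum hit position, and builds the result with a single slice (C-level search instead of the Python-level loop).
-- outside the precondition, e.g. on find_start_to_stop('TAG', -3, '', 0): A returns (False, 'TAG'), B returns (True, 'TAG')
import Mathlib
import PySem

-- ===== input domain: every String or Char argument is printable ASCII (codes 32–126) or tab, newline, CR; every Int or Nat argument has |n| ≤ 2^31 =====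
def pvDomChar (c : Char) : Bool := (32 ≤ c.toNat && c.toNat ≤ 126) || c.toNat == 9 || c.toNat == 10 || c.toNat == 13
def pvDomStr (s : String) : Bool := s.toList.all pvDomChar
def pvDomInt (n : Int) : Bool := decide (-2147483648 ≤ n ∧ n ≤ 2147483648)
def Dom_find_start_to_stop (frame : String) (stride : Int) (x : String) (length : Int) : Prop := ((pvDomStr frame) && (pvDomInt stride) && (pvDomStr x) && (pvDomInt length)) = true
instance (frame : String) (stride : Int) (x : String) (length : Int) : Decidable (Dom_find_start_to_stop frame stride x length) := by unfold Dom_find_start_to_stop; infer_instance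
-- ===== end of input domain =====

-- B replaces A's per-character window-scanning loop by three str.find calls, a minimum, and one
-- slice (idiomatic; measured faster in a timing run); equivalence proved for stride ≥ 0.

-- module constant stop_codons = ['TAG', 'TAA', 'TGA']
def pvStopCodons : List (List Char) := [['T','A','G'], ['T','A','A'], ['T','G','A']]

-- ===== PORT A =====
-- the for-loop over j in range(len(frame[stride:])), with break, as structural recursion
def fsGoA (f : List Char) (stride : Int) : List Nat → List Char → Bool × List Char
  | [], x => (false, x)
  | j :: rest, x =>
    let x1 := x ++ (PySem.List.pyGet? f ((j : Int) + stride)).elim [] (fun ch => [ch])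
    if PySem.List.slice f (some ((j : Int) + stride)) (some ((j : Int) + stride + 3)) ∈ pvStopCodons then
      (true, x1 ++ (PySem.List.pyGet? f ((j : Int) + stride + 1)).elim [] (fun ch => [ch])
                ++ (PySem.List.pyGet? f ((j : Int) + stride + 2)).elim [] (fun ch => [ch]))
    else fsGoA f stride rest x1

def find_start_to_stop (frame : String) (stride : Int) (x : String) (length : Int) : Bool × String :=
  let f := frame.toList
  let r := fsGoA f stride (List.range (PySem.List.slice f (some stride) none).length) x.toList
  (r.1, String.mk r.2)

-- ===== PORT B =====
def find_start_to_stop_alt (frame : String) (stride : Int) (x : String) (length : Int) : Bool × String :=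
  let f := frame.toList
  let hits := (pvStopCodons.map (fun c => PySem.Chars.findFrom f c stride none)).filter (fun p => !(p == -1))
  match PySem.List.min? hits (fun p => p) with
  | some p => (true, String.mk (x.toList ++ PySem.List.slice f (some stride) (some (p + 3))))
  | none => (false, String.mk (x.toList ++ PySem.List.slice f (some stride) none))

-- ===== PRECONDITION & SPEC =====
-- Pre_ excludes negative stride: there A raises IndexError when stride < -len(frame), and for
-- -len(frame) ≤ stride < 0 A's value comes from accidental negative-index wraparound combined with
-- negative-slice clamping (its codon windows near the end collapse to empty slices).
def Pre_find_start_to_stop (frame : String) (stride : Int) (x : String) (length : Int) : Prop := 0 ≤ stride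
instance (frame : String) (stride : Int) (x : String) (length : Int) : Decidable (Pre_find_start_to_stop frame stride x length) := by unfold Pre_find_start_to_stop; infer_instance

def pvWitness_find_start_to_stop : String × Int × String × Int := ("ATGTAAC", 1, "M", 4)

def Spec_find_start_to_stop (frame : String) (stride : Int) (x : String) (length : Int) (out : Bool × String) : Prop := out = find_start_to_stop_alt frame stride x length
instance (frame : String) (stride : Int) (x : String) (length : Int) (out : Bool × String) : Decidable (Spec_find_start_to_stop frame stride x length out) := by unfold Spec_find_start_to_stop; infer_instance

-- ===== CLAIM (what is proved, stated in full; the proofs are below) =====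
def Claim_equal_find_start_to_stop : Prop := ∀ (frame : String) (stride : Int) (x : String) (length : Int), Dom_find_start_to_stop frame stride x length → Pre_find_start_to_stop frame stride x length → Spec_find_start_to_stop frame stride x length (find_start_to_stop frame stride x length)
-- ===== LEMMAS AND PROOFS =====

-- "some stop codon starts at position p of f"
def pvStopAt (f : List Char) (p : Nat) : Bool := pvStopCodons.any (fun c => decide (c <+: f.drop p))

lemma pvTake3 (l : List Char) (h : 3 ≤ l.length) :
    l.take 3 = [l[0], l[1], l[2]] := by
  match l, h with
  | a :: b :: c :: t, _ => simp

lemma pvMemCodons_iff (l : List Char) :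
    (l.take 3 ∈ pvStopCodons) ↔ (pvStopCodons.any (fun c => decide (c <+: l)) = true) := by
  have h : ∀ c : List Char, c.length = 3 → (l.take 3 = c ↔ c <+: l) := by
    intro c hc
    constructor
    · intro h; exact h ▸ List.take_prefix 3 l
    · intro h; rw [List.prefix_iff_eq_take.mp h, hc]
  simp only [pvStopCodons, List.mem_cons, List.not_mem_nil, or_false, List.any_cons, List.any_nil,
    Bool.or_eq_true, Bool.false_eq_true, decide_eq_true_eq]
  rw [h ['T','A','G'] rfl, h ['T','A','A'] rfl, h ['T','G','A'] rfl]

lemma pvStopAt_lt (f : List Char) (p : Nat) (h : pvStopAt f p = true) : p + 3 ≤ f.length := by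
  simp only [pvStopAt, List.any_eq_true, decide_eq_true_eq] at h
  obtain ⟨c, hc, hpre⟩ := h
  have hlen : c.length ≤ (f.drop p).length := hpre.length_le
  have h3 : c.length = 3 := by fin_cases hc <;> rfl
  simp [List.length_drop, h3] at hlen
  omega

-- A's loop, characterised by the first stop position in its index range
lemma pvGoA_spec (f : List Char) (s : Nat) :
    ∀ (m j : Nat) (x : List Char), s + j + m ≤ f.length →
    fsGoA f (s : Int) (List.range' j m) x =
      match (List.range' (s + j) m).find? (fun p => pvStopAt f p) with
      | some p => (true, x ++ (f.drop (s + j)).take (p + 3 - (s + j)))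
      | none => (false, x ++ (f.drop (s + j)).take m) := by
  intro m
  induction m with
  | zero => intro j x _; simp [fsGoA]
  | succ m ih =>
    intro j x hle
    have hjlt : s + j < f.length := by omega
    rw [List.range'_succ, List.range'_succ]
    have hget : PySem.List.pyGet? f ((j : Int) + (s : Int)) = some f[s + j] := by
      have : ((j : Int) + (s : Int)) = ((s + j : Nat) : Int) := by push_cast; ring
      rw [this, PySem.List.pyGet?_natCast]
      simp [hjlt]
    have hdropc : f.drop (s + j) = f[s + j] :: f.drop (s + j + 1) :=
      List.drop_eq_getElem_cons hjlt
    have hslice : PySem.List.slice f (some ((j : Int) + (s : Int))) (some ((j : Int) + (s : Int) + 3))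
        = (f.drop (s + j)).take 3 := by
      have h1 : ((j : Int) + (s : Int)) = ((s + j : Nat) : Int) := by push_cast; ring
      have h2 : ((j : Int) + (s : Int) + 3) = ((s + j + 3 : Nat) : Int) := by push_cast; ring
      rw [h2, h1, PySem.List.slice_natCast]
      congr 1
      omega
    by_cases hstop : pvStopAt f (s + j) = true
    · rw [List.find?_cons_of_pos hstop]
      have h3 : s + j + 3 ≤ f.length := pvStopAt_lt f (s + j) hstop
      have hmem : PySem.List.slice f (some ((j : Int) + (s : Int))) (some ((j : Int) + (s : Int) + 3)) ∈ pvStopCodons := by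
        rw [hslice]
        exact (pvMemCodons_iff _).mpr (by simpa [pvStopAt] using hstop)
      simp only [fsGoA, hget, if_pos hmem]
      have hg1 : PySem.List.pyGet? f ((j : Int) + (s : Int) + 1) = some f[s + j + 1] := by
        have : ((j : Int) + (s : Int) + 1) = ((s + j + 1 : Nat) : Int) := by push_cast; ring
        rw [this, PySem.List.pyGet?_natCast]
        exact List.getElem?_eq_getElem (by omega)
      have hg2 : PySem.List.pyGet? f ((j : Int) + (s : Int) + 2) = some f[s + j + 2] := by
        have : ((j : Int) + (s : Int) + 2) = ((s + j + 2 : Nat) : Int) := by push_cast; ring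
        rw [this, PySem.List.pyGet?_natCast]
        exact List.getElem?_eq_getElem (by omega)
      simp only [hg1, hg2, Option.elim]
      have htake : (f.drop (s + j)).take (s + j + 3 - (s + j)) = [f[s + j], f[s + j + 1], f[s + j + 2]] := by
        have : s + j + 3 - (s + j) = 3 := by omega
        rw [this, pvTake3 _ (by simp [List.length_drop]; omega)]
        simp only [List.getElem_drop, Nat.add_zero]
        rfl
      rw [htake]
      simp
    · rw [List.find?_cons_of_neg (by simpa using hstop)]
      have hmem : ¬ PySem.List.slice f (some ((j : Int) + (s : Int))) (some ((j : Int) + (s : Int) + 3)) ∈ pvStopCodons := by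
        rw [hslice]
        intro hc
        exact hstop (by simpa [pvStopAt] using (pvMemCodons_iff _).mp hc)
      simp only [fsGoA, hget, if_neg hmem, Option.elim]
      have := ih (j + 1) (x ++ [f[s + j]]) (by omega)
      have hsj : s + (j + 1) = s + j + 1 := by omega
      rw [this, hsj]
      cases hfind : (List.range' (s + j + 1) m).find? (fun p => pvStopAt f p) with
      | some p =>
        dsimp only
        have hp : s + j + 1 ≤ p := by
          have := List.find?_some hfind
          have hmem' := List.mem_range'_1.mp (List.mem_of_find?_eq_some hfind)
          omega
        have harith : p + 3 - (s + j) = (p + 3 - (s + j + 1)) + 1 := by omega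
        rw [harith, hdropc, List.take_succ_cons]
        simp
      | none =>
        dsimp only
        rw [hdropc, List.take_succ_cons]
        simp

-- least-element characterisation of find? on an arithmetic range
lemma pvFind?_range' (P : Nat → Bool) :
    ∀ (m s p : Nat), (List.range' s m).find? P = some p ↔
      (s ≤ p ∧ p < s + m ∧ P p = true ∧ ∀ q, s ≤ q → q < p → P q = false) := by
  intro m
  induction m with
  | zero =>
    intro s p; simp
    intro h1 h2 _
    exact absurd h2 (by omega)
  | succ m ih =>
    intro s p
    rw [List.range'_succ]
    by_cases hP : P s = true
    · rw [List.find?_cons_of_pos hP]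
      constructor
      · rintro ⟨rfl⟩; exact ⟨le_refl _, by omega, hP, fun q h1 h2 => by omega⟩
      · rintro ⟨h1, h2, h3, h4⟩
        rcases Nat.eq_or_lt_of_le h1 with rfl | hlt
        · rfl
        · exact absurd hP (by simp [h4 s (le_refl _) hlt])
    · rw [List.find?_cons_of_neg (by simpa using hP)]
      rw [ih]
      constructor
      · rintro ⟨h1, h2, h3, h4⟩
        refine ⟨by omega, by omega, h3, fun q hq1 hq2 => ?_⟩
        rcases Nat.eq_or_lt_of_le hq1 with rfl | hlt
        · simpa using hP
        · exact h4 q hlt hq2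
      · rintro ⟨h1, h2, h3, h4⟩
        have hne : s ≠ p := by rintro rfl; exact hP h3
        exact ⟨by omega, by omega, h3, fun q hq1 hq2 => h4 q (by omega) hq2⟩

lemma pvFind?_range'_none (P : Nat → Bool) :
    ∀ (m s : Nat), (List.range' s m).find? P = none ↔ ∀ q, s ≤ q → q < s + m → P q = false := by
  intro m s
  rw [List.find?_eq_none]
  constructor
  · intro h q h1 h2
    simpa using h q (List.mem_range'_1.mpr ⟨h1, h2⟩)
  · intro h q hq
    have := List.mem_range'_1.mp hq
    simpa using h q this.1 this.2

lemma pvFindFrom_eq_neg_one_iff (f c : List Char) (s : Nat) (hs : s ≤ f.length) (hc : 3 ≤ c.length) :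
    PySem.Chars.findFrom f c (s : Int) none = -1 ↔ ∀ p, s ≤ p → ¬ c <+: f.drop p := by
  rw [PySem.Chars.findFrom_natCast_eq_neg_one_iff f c s hs]
  constructor
  · intro h p hp hpre
    apply h
    rw [← PySem.Chars.isIn_iff_infix, ← PySem.Chars.exists_prefix_drop_iff_isIn]
    refine ⟨p - s, ?_⟩
    rw [List.drop_drop]
    rwa [Nat.add_sub_cancel' hp]
  · intro h hinf
    obtain ⟨j, hj⟩ := (PySem.Chars.exists_prefix_drop_iff_isIn c (f.drop s)).mpr
      ((PySem.Chars.isIn_iff_infix c (f.drop s)).mpr hinf)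
    rw [List.drop_drop] at hj
    exact h (s + j) (by omega) hj

lemma pvFindFrom_big (f c : List Char) (s : Nat) (hs : f.length < s) :
    PySem.Chars.findFrom f c (s : Int) none = -1 := by
  simp only [PySem.Chars.findFrom]
  have h1 : ¬ ((s : Int) < 0) := by omega
  have h2 : ((f.length : Int) < (s : Int)) := by exact_mod_cast hs
  simp [h1, h2]

lemma pvAlt_min (f : List Char) (s : Nat) (hs : s ≤ f.length) :
    PySem.List.min? ((pvStopCodons.map (fun c => PySem.Chars.findFrom f c (s : Int) none)).filter
        (fun p => !(p == (-1 : Int)))) (fun p => p)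
      = ((List.range' s (f.length - s)).find? (fun p => pvStopAt f p)).map (fun p => (p : Int)) := by
  have hc3 : ∀ c ∈ pvStopCodons, c.length = 3 := by decide
  set hits := (pvStopCodons.map (fun c => PySem.Chars.findFrom f c (s : Int) none)).filter
      (fun p => !(p == (-1 : Int))) with hhitsdef
  have hmemhits : ∀ v : Int, v ∈ hits ↔
      (v ≠ -1 ∧ ∃ c ∈ pvStopCodons, PySem.Chars.findFrom f c (s : Int) none = v) := by
    intro v
    rw [hhitsdef, List.mem_filter]
    simp only [List.mem_map]
    constructor
    · rintro ⟨⟨c, hc, hcv⟩, hne⟩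
      exact ⟨by simpa using hne, c, hc, hcv⟩
    · rintro ⟨hne, c, hc, hcv⟩
      exact ⟨⟨c, hc, hcv⟩, by simpa using hne⟩
  have hstop_iff : ∀ p : Nat, pvStopAt f p = true ↔ ∃ c ∈ pvStopCodons, c <+: f.drop p := by
    intro p; simp [pvStopAt, List.any_eq_true]
  cases hfind : (List.range' s (f.length - s)).find? (fun p => pvStopAt f p) with
  | none =>
    have hnone := (pvFind?_range'_none _ _ _).mp hfind
    have hemp : hits = [] := by
      rw [hhitsdef, List.filter_eq_nil_iff]
      intro v hv
      obtain ⟨c, hc, hcv⟩ := List.mem_map.mp hv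
      have hv1 : v = -1 := by
        rw [← hcv]
        refine (pvFindFrom_eq_neg_one_iff f c s hs (by simp [hc3 c hc])).mpr ?_
        intro p hp hpre
        by_cases hplen : p < f.length
        · have := hnone p hp (by omega)
          rw [← Bool.not_eq_true, hstop_iff] at this
          exact this ⟨c, hc, hpre⟩
        · have hl := hpre.length_le
          rw [hc3 c hc] at hl
          simp [List.length_drop] at hl
          omega
      simp [hv1]
    rw [hemp]
    rfl
  | some p =>
    obtain ⟨hsp, hplt, hPp, hmin⟩ := (pvFind?_range' _ _ _ _).mp hfind
    obtain ⟨c₀, hc₀, hpref₀⟩ := (hstop_iff p).mp hPp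
    have hffc0 : PySem.Chars.findFrom f c₀ (s : Int) none = (p : Int) := by
      have hne : PySem.Chars.findFrom f c₀ (s : Int) none ≠ -1 := by
        intro h
        exact (pvFindFrom_eq_neg_one_iff f c₀ s hs (by simp [hc3 c₀ hc₀])).mp h p hsp hpref₀
      obtain ⟨hge, hpref, hminf⟩ := PySem.Chars.findFrom_natCast_spec f c₀ s hs hne
      set r := PySem.Chars.findFrom f c₀ (s : Int) none with hr
      have h0r : (0 : Int) ≤ r := le_trans (by positivity) hge
      have hsr : s ≤ r.toNat := by omega
      have hrp : r.toNat ≤ p := by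
        by_contra hlt
        exact hminf p hsp (by omega) hpref₀
      have hpr : p ≤ r.toNat := by
        by_contra hlt
        have hfalse := hmin r.toNat hsr (by omega)
        rw [← Bool.not_eq_true, hstop_iff] at hfalse
        exact hfalse ⟨c₀, hc₀, hpref⟩
      omega
    have hpin : (p : Int) ∈ hits :=
      (hmemhits (p : Int)).mpr ⟨by omega, c₀, hc₀, hffc0⟩
    have hlb : ∀ v ∈ hits, (p : Int) ≤ v := by
      intro v hv
      obtain ⟨hvne, c, hc, hcv⟩ := (hmemhits v).mp hv
      obtain ⟨hge, hpref, _⟩ := PySem.Chars.findFrom_natCast_spec f c s hs (by rw [hcv]; exact hvne)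
      rw [hcv] at hge hpref
      have h0v : (0 : Int) ≤ v := le_trans (by positivity) hge
      have hsv : s ≤ v.toNat := by omega
      have : ¬ v.toNat < p := by
        intro hlt
        have hfalse := hmin v.toNat hsv hlt
        rw [← Bool.not_eq_true, hstop_iff] at hfalse
        exact hfalse ⟨c, hc, hpref⟩
      omega
    cases hmq : PySem.List.min? hits (fun q => q) with
    | none =>
      exact absurd ((PySem.List.min?_eq_none_iff hits _).mp hmq) (List.ne_nil_of_mem hpin)
    | some m =>
      have h1 := PySem.List.min?_mem hmq
      have h2 : m ≤ (p : Int) := PySem.List.min?_isMin hmq (p : Int) hpin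
      have : m = (p : Int) := le_antisymm h2 (hlb m h1)
      simp [this]

-- ===== VERDICT (by name: the statement is the Claim_ definition above) =====
theorem find_start_to_stop_spec : Claim_equal_find_start_to_stop := by
  intro frame stride x length _ hpre
  unfold Spec_find_start_to_stop
  unfold Pre_find_start_to_stop at hpre
  have hstride : stride = ((stride.toNat : Nat) : Int) := (Int.toNat_of_nonneg hpre).symm
  set f := frame.toList with hf
  set s := stride.toNat with hsdef
  unfold find_start_to_stop find_start_to_stop_alt
  simp only []
  rw [hstride]
  by_cases hcase : s ≤ f.length
  · rw [PySem.List.slice_from_natCast, pvAlt_min f s hcase]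
    have hlen : (List.drop s f).length = f.length - s := by simp
    rw [hlen, List.range_eq_range']
    have hA := pvGoA_spec f s (f.length - s) 0 x.toList (by omega)
    simp only [Nat.add_zero] at hA
    rw [hA]
    cases hfind : (List.range' s (f.length - s)).find? (fun p => pvStopAt f p) with
    | some p =>
      dsimp only
      show (true, String.mk (x.toList ++ List.take (p + 3 - s) (List.drop s f)))
          = (true, String.mk (x.toList ++ PySem.List.slice frame.toList (some (s : Int)) (some ((p : Int) + 3))))
      have h3 : ((p : Int) + 3) = ((p + 3 : Nat) : Int) := by push_cast; ring
      rw [h3, PySem.List.slice_natCast]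
    | none =>
      dsimp only
      show (false, String.mk (x.toList ++ List.take (f.length - s) (List.drop s f)))
          = (false, String.mk (x.toList ++ List.drop s frame.toList))
      have : List.take (f.length - s) (List.drop s f) = List.drop s f := by
        rw [← hlen]; exact List.take_length
      rw [this]
  · have hdrop : List.drop s f = [] := List.drop_eq_nil_of_le (by omega)
    rw [PySem.List.slice_from_natCast, hdrop]
    simp only [List.length_nil, List.range_zero]
    have hhits : (pvStopCodons.map (fun c => PySem.Chars.findFrom f c (s : Int) none)).filter
        (fun p => !(p == (-1 : Int))) = [] := by
      have h1 := pvFindFrom_big f ['T','A','G'] s (by omega)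
      have h2 := pvFindFrom_big f ['T','A','A'] s (by omega)
      have h3 := pvFindFrom_big f ['T','G','A'] s (by omega)
      simp [pvStopCodons, h1, h2, h3]
    rw [hhits]
    simp [fsGoA, PySem.List.min?]
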